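-- pv_equiv track=rewrite | github.com/Lucavogel/adaptive_robot_planning | main.py | normalize_object_name
-- ===== SOURCE A (Python) =====
-- def normalize_object_name(action_object, detected_objects):
--     """Normaliser et mapper les noms d'objets"""
--     if not action_object:
--         return None
--
--     # Mapping des variations courantes
--     object_mappings = {
--         'CELL_PHONE': ['cell phone', 'phone', 'mobile'],
--         'DINING_TABLE': ['dining table', 'table'],
--         'CUP': ['cup', 'mug'],
--         'BOTTLE': ['bottle', 'water bottle'],
--         'LAPTOP': ['laptop', 'computer'],
--         'CHAIR': ['chair', 'seat'],
--         'PERSON': ['person', 'human'],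
--     }
--
--     # Recherche directe
--     for yolo_obj in detected_objects:
--         obj_name = yolo_obj['name'].lower()
--
--         # Match exact (après normalisation)
--         if action_object.lower().replace('_', ' ') == obj_name:
--             return obj_name
--
--         # Match via mapping
--         if action_object in object_mappings:
--             if obj_name in object_mappings[action_object]:
--                 return obj_name
--
--     # Fallback : recherche partielle
--     for yolo_obj in detected_objects:
--         obj_name = yolo_obj['name'].lower()
--         if any(word in obj_name for word in action_object.lower().split('_')):
--             return obj_name
--
--     return None
-- ===== SOURCE B (Python) =====
-- def normalize_object_name(action_object, detected_objects):
--     """Single priority-tracking pass: return on an exact/mapping match, remember the first partial match."""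
--     if not action_object:
--         return None
--
--     object_mappings = {
--         'CELL_PHONE': ['cell phone', 'phone', 'mobile'],
--         'DINING_TABLE': ['dining table', 'table'],
--         'CUP': ['cup', 'mug'],
--         'BOTTLE': ['bottle', 'water bottle'],
--         'LAPTOP': ['laptop', 'computer'],
--         'CHAIR': ['chair', 'seat'],
--         'PERSON': ['person', 'human'],
--     }
--     exact = action_object.lower().replace('_', ' ')
--     synonyms = object_mappings.get(action_object, [])
--     words = action_object.lower().split('_')
--
--     partial = None
--     for yolo_obj in detected_objects:
--         obj_name = yolo_obj['name'].lower()
--         if obj_name == exact or obj_name in synonyms: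
--             return obj_name
--         if partial is None and any(word in obj_name for word in words):
--             partial = obj_name
--     return partial
-- ===== Notes on version B (the rewrite author's own statement) =====
-- stated objective: alternative
-- what changed: A's two sequential scans (exact/mapping pass, then a separate partial-match pass) are replaced by a single priority-tracking pass that returns immediately on an exact/synonym match and remembers only the first partial match, with the normalized key, synonym list and word list hoisted out of the loop.
-- outside the precondition, e.g. on normalize_object_name('CUP', [{'name': 'cup'}, {}]): A returns 'cup', B returns 'cup'
import Mathlib
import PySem

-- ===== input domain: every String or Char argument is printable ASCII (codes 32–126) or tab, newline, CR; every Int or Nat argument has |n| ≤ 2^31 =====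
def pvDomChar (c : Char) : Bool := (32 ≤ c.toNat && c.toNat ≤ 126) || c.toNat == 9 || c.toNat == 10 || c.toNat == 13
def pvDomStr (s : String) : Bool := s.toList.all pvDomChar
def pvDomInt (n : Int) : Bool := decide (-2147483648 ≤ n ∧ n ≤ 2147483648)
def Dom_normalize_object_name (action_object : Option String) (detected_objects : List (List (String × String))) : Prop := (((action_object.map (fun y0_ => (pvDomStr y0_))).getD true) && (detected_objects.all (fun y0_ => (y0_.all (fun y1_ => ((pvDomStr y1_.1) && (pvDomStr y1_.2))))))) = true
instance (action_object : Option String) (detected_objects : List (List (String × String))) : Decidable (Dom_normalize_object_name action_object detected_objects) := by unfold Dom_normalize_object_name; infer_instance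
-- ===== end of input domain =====

-- B replaces A's two sequential scans by one priority-tracking pass (early return on an
-- exact/mapping match, first partial match remembered); objective: alternative decomposition.

-- ===== PORT A =====
-- the object_mappings dict literal shared by both programs
def pvObjectMappings : PySem.Dict String (List String) :=
  PySem.Dict.mk [
    ("CELL_PHONE", ["cell phone", "phone", "mobile"]),
    ("DINING_TABLE", ["dining table", "table"]),
    ("CUP", ["cup", "mug"]),
    ("BOTTLE", ["bottle", "water bottle"]),
    ("LAPTOP", ["laptop", "computer"]),
    ("CHAIR", ["chair", "seat"]),
    ("PERSON", ["person", "human"])]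

-- first loop of A: exact / mapping match ('yolo_obj["name"]' ported as getD "name" ""; exact inside Pre_)
def pvALoop1 (a : String) : List (List (String × String)) → Option String
  | [] => none
  | d :: rest =>
    let objName := PySem.Str.lower ((PySem.Dict.mk d).getD "name" "")
    if (PySem.Str.replace (PySem.Str.lower a) "_" " " == objName) = true then some objName
    else if (pvObjectMappings.contains a && (pvObjectMappings.getD a []).contains objName) = true then
      some objName
    else pvALoop1 a rest

-- second loop of A: partial (substring) match
def pvALoop2 (a : String) : List (List (String × String)) → Option String
  | [] => none
  | d :: rest =>
    let objName := PySem.Str.lower ((PySem.Dict.mk d).getD "name" "")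
    if (((PySem.Str.split? (PySem.Str.lower a) "_").getD []).any (fun w => PySem.Str.isIn w objName)) = true then
      some objName
    else pvALoop2 a rest

def normalize_object_name (action_object : Option String) (detected_objects : List (List (String × String))) : Option String :=
  match action_object with
  | none => none
  | some a =>
    if a = "" then none
    else
      match pvALoop1 a detected_objects with
      | some r => some r
      | none => pvALoop2 a detected_objects

-- ===== PORT B =====
-- single pass: return on tier 0 (exact/synonym), remember the first tier-1 (partial) match
def pvBLoop (exact : String) (synonyms : List String) (words : List String) :
    List (List (String × String)) → Option String → Option String
  | [], part => part
  | d :: rest, part =>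
    let objName := PySem.Str.lower ((PySem.Dict.mk d).getD "name" "")
    if (objName == exact || synonyms.contains objName) = true then some objName
    else pvBLoop exact synonyms words rest
      (if (part.isNone && words.any (fun w => PySem.Str.isIn w objName)) = true then some objName else part)

def normalize_object_name_alt (action_object : Option String) (detected_objects : List (List (String × String))) : Option String :=
  match action_object with
  | none => none
  | some a =>
    if a = "" then none
    else
      let exact := PySem.Str.replace (PySem.Str.lower a) "_" " "
      let synonyms := pvObjectMappings.getD a []
      let words := (PySem.Str.split? (PySem.Str.lower a) "_").getD []
      pvBLoop exact synonyms words detected_objects none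

-- ===== PRECONDITION & SPEC =====
-- Pre_ excludes inputs where some detected object lacks a "name" key (Python A raises KeyError
-- there); it is slightly narrower than A's lazy evaluation: an early match can return before A
-- reaches the keyless dict (see the cite), in which case B returns the same value anyway.
def Pre_normalize_object_name (action_object : Option String) (detected_objects : List (List (String × String))) : Prop :=
  (action_object ≠ none ∧ action_object ≠ some "") →
    ∀ d ∈ detected_objects, ((PySem.Dict.mk d).get? "name").isSome = true
instance (action_object : Option String) (detected_objects : List (List (String × String))) : Decidable (Pre_normalize_object_name action_object detected_objects) := by unfold Pre_normalize_object_name; infer_instance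

def pvWitness_normalize_object_name : Option String × (List (List (String × String))) :=
  (some "CUP", [[("name", "bottle")], [("name", "mug")]])

def Spec_normalize_object_name (action_object : Option String) (detected_objects : List (List (String × String))) (out : Option String) : Prop := out = normalize_object_name_alt action_object detected_objects
instance (action_object : Option String) (detected_objects : List (List (String × String))) (out : Option String) : Decidable (Spec_normalize_object_name action_object detected_objects out) := by unfold Spec_normalize_object_name; infer_instance

-- ===== CLAIM (what is proved, stated in full; the proofs are below) =====
def Claim_equal_normalize_object_name : Prop := ∀ (action_object : Option String) (detected_objects : List (List (String × String))), Dom_normalize_object_name action_object detected_objects → Pre_normalize_object_name action_object detected_objects → Spec_normalize_object_name action_object detected_objects (normalize_object_name action_object detected_objects)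

-- ===== LEMMAS AND PROOFS =====

-- A guards the synonym lookup by key membership; B looks up with default []: if the synonym
-- list contains anything, the key was present.
lemma contains_of_getD_contains (a n : String) (h : (pvObjectMappings.getD a []).contains n = true) :
    pvObjectMappings.contains a = true := by
  by_contra hc
  have hc' : pvObjectMappings.contains a = false := by cases hb : pvObjectMappings.contains a <;> simp_all
  rw [PySem.Dict.getD_of_not_contains _ _ hc'] at h
  simp at h

-- the one-pass loop computes: first exact/synonym match, else accumulator, else first partial match
lemma bLoop_eq (a : String) (dos : List (List (String × String))) (acc : Option String) :
    pvBLoop (PySem.Str.replace (PySem.Str.lower a) "_" " ") (pvObjectMappings.getD a [])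
        ((PySem.Str.split? (PySem.Str.lower a) "_").getD []) dos acc
      = (pvALoop1 a dos).or (acc.or (pvALoop2 a dos)) := by
  induction dos generalizing acc with
  | nil => cases acc <;> rfl
  | cons d rest ih =>
    simp only [pvBLoop, pvALoop1, pvALoop2]
    set ex := PySem.Str.replace (PySem.Str.lower a) "_" " " with hex
    set ws := (PySem.Str.split? (PySem.Str.lower a) "_").getD [] with hws
    set n := PySem.Str.lower ((PySem.Dict.mk d).getD "name" "") with hn
    by_cases h0 : (ex == n) = true
    · have h0' : (n == ex) = true := beq_iff_eq.mpr (beq_iff_eq.mp h0).symm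
      rw [if_pos (by rw [h0', Bool.true_or]), if_pos h0]
      rfl
    · have h0' : (n == ex) = false :=
        beq_eq_false_iff_ne.mpr (fun h => h0 (beq_iff_eq.mpr h.symm))
      have h0f : (ex == n) = false := by cases hb : (ex == n) <;> simp_all
      by_cases hm : (pvObjectMappings.getD a []).contains n = true
      · rw [if_pos (by rw [h0', hm, Bool.false_or]), if_neg h0,
            if_pos (show (pvObjectMappings.contains a && (pvObjectMappings.getD a []).contains n) = true
              from by rw [contains_of_getD_contains a n hm, hm]; rfl)]
        rfl
      · have hm' : (pvObjectMappings.getD a []).contains n = false := by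
          cases hb : (pvObjectMappings.getD a []).contains n <;> simp_all
        rw [if_neg (by rw [h0', hm', Bool.false_or]; exact Bool.false_ne_true),
            if_neg h0,
            if_neg (show ¬(pvObjectMappings.contains a && (pvObjectMappings.getD a []).contains n) = true
              from by rw [hm', Bool.and_false]; exact Bool.false_ne_true),
            ih]
        cases acc with
        | some x => rfl
        | none =>
          cases ht1 : (ws.any (fun w => PySem.Str.isIn w n)) <;> simp [ht1, Option.or]

-- ===== VERDICT (by name: the statement is the Claim_ definition above) =====
theorem normalize_object_name_spec : Claim_equal_normalize_object_name := by
  intro ao dos _ _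
  unfold Spec_normalize_object_name normalize_object_name normalize_object_name_alt
  cases ao with
  | none => rfl
  | some a =>
    by_cases ha : a = ""
    · simp [ha]
    · simp only [if_neg ha]
      rw [bLoop_eq]
      cases h1 : pvALoop1 a dos <;> rfl
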